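-- pv_equiv track=rewrite | github.com/micromass/Noah | Noah.py | StringReplace
-- ===== SOURCE A (Python) =====
-- def StringReplace(string):
--     L = len(string)
--     if L == 0:
--         return string
--     Res = string[0]
--     prev = string[0]
--     for iter in range(1,L):
--         if string[iter] == '-':
--             if prev in ["(", "+", "*","-","/","^"]:
--                 Res = Res + string[iter]
--             else:
--                 Res = Res + "+" + string[iter]
--         else:
--             Res = Res + string[iter]
--         prev = string[iter]
--     return Res
-- ===== SOURCE B (Python) =====
-- def StringReplace(string):
--     # Split on '-' and rejoin: each dash becomes '+-' when the chunk before it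
--     # ends in a non-operator character, plain '-' otherwise.
--     parts = string.split('-')
--     out = [parts[0]]
--     prev = parts[0]
--     for part in parts[1:]:
--         out.append('+-' if prev and prev[-1] not in '(+*/^' else '-')
--         out.append(part)
--         prev = part
--     return ''.join(out)
-- ===== Notes on version B (the rewrite author's own statement) =====
-- stated objective: faster
-- what changed: B splits the string on the dash character via str.split and rejoins the dash-free chunks with one final join, deciding per dash whether to insert a plus from the preceding chunk's last character, instead of A's per-character scan with a prev variable and repeated quadratic string concatenation.
import Mathlib
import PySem

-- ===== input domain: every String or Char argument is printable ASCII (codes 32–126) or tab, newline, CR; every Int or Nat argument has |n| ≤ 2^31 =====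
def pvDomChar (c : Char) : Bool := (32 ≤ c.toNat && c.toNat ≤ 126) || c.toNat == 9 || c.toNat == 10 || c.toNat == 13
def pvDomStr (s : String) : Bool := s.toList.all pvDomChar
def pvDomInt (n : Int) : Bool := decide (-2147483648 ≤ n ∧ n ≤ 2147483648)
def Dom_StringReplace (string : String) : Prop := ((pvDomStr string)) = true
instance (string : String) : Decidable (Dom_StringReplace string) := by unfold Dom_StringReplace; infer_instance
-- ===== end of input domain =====

-- B splits the string on '-' and rejoins the chunks, choosing '+-' or '-' per dash from the
-- preceding chunk's last character, instead of A's per-character scan with quadratic concatenation (faster, measured).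

-- ===== PORT A =====
-- the for-loop over range(1,L): state is (Res, prev); recursion over the remaining characters
def pvGoA : List Char → Char → List Char → List Char
  | [], _, res => res
  | c :: rest, prev, res =>
      if c = '-' then
        if prev ∈ ['(', '+', '*', '-', '/', '^'] then
          pvGoA rest c (res ++ [c])
        else
          pvGoA rest c (res ++ ['+', c])
      else
        pvGoA rest c (res ++ [c])

def StringReplace (string : String) : String :=
  match string.toList with
  | [] => string
  | c0 :: rest => String.ofList (pvGoA rest c0 [c0])

-- ===== PORT B =====
-- `'+-' if prev and prev[-1] not in '(+*/^' else '-'`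
def pvSep (prev : List Char) : List Char :=
  match prev.getLast? with
  | none => ['-']
  | some c => if c ∈ ['(', '+', '*', '/', '^'] then ['-'] else ['+', '-']

-- the for-loop over parts[1:]: appends separator then part, prev := part
def pvGoB : List Char → List (List Char) → List Char
  | _, [] => []
  | prev, p :: ps => pvSep prev ++ p ++ pvGoB p ps

-- str.split('-') (single-char separator) ported as List.splitOn '-'
def StringReplace_alt (string : String) : String :=
  match string.toList.splitOn '-' with
  | [] => ""          -- unreachable: splitOn never returns []
  | p0 :: ps => String.ofList (p0 ++ pvGoB p0 ps)

-- ===== PRECONDITION & SPEC =====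
def Spec_StringReplace (string : String) (out : String) : Prop := out = StringReplace_alt string
instance (string : String) (out : String) : Decidable (Spec_StringReplace string out) := by unfold Spec_StringReplace; infer_instance

-- ===== CLAIM (what is proved, stated in full; the proofs are below) =====
def Claim_equal_StringReplace : Prop := ∀ (string : String), Dom_StringReplace string → Spec_StringReplace string (StringReplace string)

-- ===== LEMMAS AND PROOFS =====
-- A's per-character emission, tail-first
def pvS (prev : Char) : List Char → List Char
  | [] => []
  | c :: l =>
      (if c = '-' then (if prev ∈ ['(', '+', '*', '-', '/', '^'] then [c] else ['+', c]) else [c])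
        ++ pvS c l

theorem pvGoA_eq (l : List Char) : ∀ (prev : Char) (res : List Char),
    pvGoA l prev res = res ++ pvS prev l := by
  induction l with
  | nil => intro prev res; simp [pvGoA, pvS]
  | cons c rest ih =>
      intro prev res
      by_cases hc : c = '-'
      · by_cases hp : prev ∈ ['(', '+', '*', '-', '/', '^']
        · simp [pvGoA, hc, hp, ih, pvS]
        · simp [pvGoA, hc, hp, ih, pvS]
      · simp [pvGoA, hc, ih, pvS]

-- copying a dash-free block leaves pvS unchanged and moves prev to the block's last char
theorem pvS_copy (p : List Char) : ∀ (prev : Char) (rest : List Char), '-' ∉ p →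
    pvS prev (p ++ rest) = p ++ pvS (p.getLastD prev) rest := by
  induction p with
  | nil => intro prev rest _; simp
  | cons c p' ih =>
      intro prev rest hfree
      have hc : c ≠ '-' := fun h => hfree (h ▸ List.mem_cons_self)
      have hfree' : '-' ∉ p' := fun h => hfree (List.mem_cons_of_mem _ h)
      simp only [List.cons_append, pvS, if_neg hc, ih c rest hfree', List.getLastD_cons]
      simp

-- B's separator from the previous chunk = A's decision at the dash's previous character
theorem pvSep_eq (p : List Char) (h : '-' ∉ p) :
    pvSep p = (if p.getLastD '-' ∈ ['(', '+', '*', '-', '/', '^'] then ['-'] else ['+', '-']) := by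
  rcases hq : p.getLast? with _ | c
  · have : p = [] := List.getLast?_eq_none_iff.mp hq
    simp [pvSep, this]
  · have hmem : c ∈ p := List.mem_of_getLast? hq
    have hc : c ≠ '-' := fun hh => h (hh ▸ hmem)
    have hd : p.getLastD '-' = c := by
      rw [List.getLastD_eq_getLast?, hq]; rfl
    have hiff : (c ∈ ['(', '+', '*', '-', '/', '^']) ↔ (c ∈ ['(', '+', '*', '/', '^']) := by
      simp only [List.mem_cons, List.not_mem_nil, or_false]
      constructor <;> intro hh <;> tauto
    rw [hd]
    by_cases hin : c ∈ ['(', '+', '*', '/', '^']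
    · simp [pvSep, hq, hin, hiff.mpr hin]
    · simp [pvSep, hq, hin]
      simp only [List.mem_cons, List.not_mem_nil, or_false] at hin
      tauto

-- the tail chunks: A's scan over the dash-joined tail = B's chunk loop
theorem pvK (ps : List (List Char)) : ∀ (pprev : List Char), '-' ∉ pprev →
    (∀ p ∈ ps, '-' ∉ p) →
    pvS (pprev.getLastD '-') (ps.flatMap (fun q => '-' :: q)) = pvGoB pprev ps := by
  induction ps with
  | nil => intro pprev _ _; simp [pvGoB, pvS]
  | cons q qs ih =>
      intro pprev hprev hfree
      have hq : '-' ∉ q := hfree q List.mem_cons_self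
      have hqs : ∀ p ∈ qs, '-' ∉ p := fun p hp => hfree p (List.mem_cons_of_mem _ hp)
      have h1 : pvS '-' (q ++ qs.flatMap (fun r => '-' :: r))
          = q ++ pvS (q.getLastD '-') (qs.flatMap (fun r => '-' :: r)) := pvS_copy q '-' _ hq
      simp only [List.flatMap_cons, List.cons_append, pvS, pvGoB]
      rw [pvSep_eq pprev hprev, h1, ih q hq hqs]
      by_cases hp : pprev.getLastD '-' ∈ ['(', '+', '*', '-', '/', '^'] <;> simp

-- [x].intercalate written as head chunk ++ flatMap of dash-prefixed chunks
theorem inter_flatMap {α : Type} (x : α) (ps : List (List α)) : ∀ (p0 : List α),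
    [x].intercalate (p0 :: ps) = p0 ++ ps.flatMap (fun q => x :: q) := by
  induction ps with
  | nil => intro p0; simp [List.intercalate]
  | cons q qs ih =>
      intro p0
      have := ih q
      simp only [List.intercalate, List.intersperse] at this ⊢
      simp_all

-- every chunk of splitOn x is x-free
theorem parts_free {α : Type} [DecidableEq α] (x : α) (xs : List α) :
    ∀ p ∈ xs.splitOn x, x ∉ p := by
  induction xs with
  | nil => simp [List.splitOn, List.splitOnP_nil]
  | cons a t ih =>
      intro p hp
      rw [List.splitOn, List.splitOnP_cons] at hp
      by_cases h : a = x
      · simp [h] at hp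
        rcases hp with hp | hp
        · simp [hp]
        · exact ih p (by simpa [List.splitOn] using hp)
      · simp [h] at hp
        have hne := List.splitOnP_ne_nil (fun y => y == x) t
        rcases hq : List.splitOnP (fun y => y == x) t with _ | ⟨q, qs⟩
        · exact absurd hq hne
        · rw [hq] at hp
          simp [List.modifyHead] at hp
          rcases hp with hp | hp
          · subst hp
            intro hx
            simp at hx
            rcases hx with h1 | h1
            · exact h h1.symm
            · exact ih q (by simp [List.splitOn, hq]) h1
          · exact ih p (by simp [List.splitOn, hq, hp])

-- ===== VERDICT (by name: the statement is the Claim_ definition above) =====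
theorem StringReplace_spec : Claim_equal_StringReplace := by
  intro s _
  unfold Spec_StringReplace StringReplace StringReplace_alt
  cases h : s.toList with
  | nil =>
      have hs : s = "" := by simp_all
      subst hs
      simp [List.splitOn, List.splitOnP_nil, pvGoB]
  | cons c0 rest =>
      rcases hsplit : (c0 :: rest).splitOn '-' with _ | ⟨p0, ps⟩
      · exact absurd hsplit (by unfold List.splitOn; exact List.splitOnP_ne_nil _ _)
      · have hfree : ∀ p ∈ p0 :: ps, '-' ∉ p := by
          rw [← hsplit]; exact parts_free '-' (c0 :: rest)
        have hp0 : '-' ∉ p0 := hfree p0 List.mem_cons_self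
        have hps : ∀ p ∈ ps, '-' ∉ p := fun p hp => hfree p (List.mem_cons_of_mem _ hp)
        have hcs : c0 :: rest = p0 ++ ps.flatMap (fun q => '-' :: q) := by
          rw [← inter_flatMap '-' ps p0, ← hsplit, List.intercalate_splitOn]
        show String.ofList (pvGoA rest c0 [c0]) = String.ofList (p0 ++ pvGoB p0 ps)
        rw [pvGoA_eq]
        congr 1
        -- goal: c0 :: pvS c0 rest = p0 ++ pvGoB p0 ps
        rcases p0 with _ | ⟨d, p0'⟩
        · -- first chunk empty: the string starts with '-'
          simp only [List.nil_append] at hcs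
          rcases ps with _ | ⟨q, qs⟩
          · simp at hcs
          · have hq : '-' ∉ q := hps q List.mem_cons_self
            have hqs : ∀ p ∈ qs, '-' ∉ p := fun p hp => hps p (List.mem_cons_of_mem _ hp)
            simp only [List.flatMap_cons, List.cons_append] at hcs
            obtain ⟨hc0, hrest⟩ := List.cons.inj hcs
            subst hc0
            rw [hrest]
            rw [pvS_copy q '-' _ hq, pvK qs q hq hqs]
            simp [pvGoB, pvSep]
        · -- first chunk nonempty: it is copied, then the chunk loop takes over
          obtain ⟨hc0, hrest⟩ := List.cons.inj hcs
          subst hc0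
          rw [hrest]
          simp only [List.append_eq]
          rw [pvS_copy p0' c0 _ (fun hh => hp0 (List.mem_cons_of_mem _ hh))]
          have hlast : p0'.getLastD c0 = (c0 :: p0').getLastD '-' := by
            rw [List.getLastD_cons]
          rw [hlast, pvK ps (c0 :: p0') hp0 hps]
          simp
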